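-- pv_equiv track=rewrite | github.com/k-young-passionate/Baekjoon | python_version/p17406.py | rotateandmin
-- ===== SOURCE A (Python) =====
-- def rotateandmin(mat, rot):
--     points = [rot[0]-rot[2]-1, rot[1]-rot[2]-1, rot[0]+rot[2]-1, rot[1]+rot[2]-1]
--     for k in range(rot[2]):
--         r1 = mat[points[0]+k][points[1]+k:(points[3]+1-k)].copy()
--         r1 = r1[:-1]
--         r1.insert(0, mat[points[0]+1+k][points[1]+k])
--         r2 = mat[points[2]-k][points[1]+k:points[3]+1-k].copy()
--         r2 = r2[1:]
--         r2.append(mat[points[2]-k-1][points[3]-k])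
--
--         c1 = [x[points[1]+k] for x in mat[points[0]+k:points[2]-k+1]]
--         c2 = [x[points[3]-k] for x in mat[points[0]+k:points[2]-k+1]]
--         c1 = c1[1:]
--         c1.append(mat[points[2]-k][points[1]+k+1])
--         c2 = c2[:-1]
--         c2.insert(0, mat[points[0]+k][points[3]-k-1])
--
--         for i in range((rot[2]-k)*2+1):
--             mat[points[0]+k][points[1]+i+k] = r1[i]
--             mat[points[2]-k][points[1]+i+k] = r2[i]
--             mat[points[0]+i+k][points[1]+k] = c1[i]
--             mat[points[0]+i+k][points[3]-k] = c2[i]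
--     candidate = []
--     for i in mat:
--         candidate.append(sum(i))
--     return min(candidate)
-- ===== SOURCE B (Python) =====
-- def rotateandmin(mat, rot):
--     s = rot[2]
--     top0 = rot[0] - s - 1
--     left0 = rot[1] - s - 1
--     for k in range(s):
--         t = top0 + k
--         l = left0 + k
--         b = t + 2 * (s - k)
--         r = l + 2 * (s - k)
--         coords = ([(t, j) for j in range(l, r)] +
--                   [(i, r) for i in range(t, b)] +
--                   [(b, j) for j in range(r, l, -1)] +
--                   [(i, l) for i in range(b, t, -1)])
--         vals = [mat[i][j] for (i, j) in coords]
--         vals = vals[-1:] + vals[:-1]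
--         for (i, j), v in zip(coords, vals):
--             mat[i][j] = v
--     return min(sum(row) for row in mat)
-- ===== Notes on version B (the rewrite author's own statement) =====
-- stated objective: simpler
-- what changed: Instead of A's four hand-sliced edge lists (with duplicated corner writes) per ring, B builds the ordered perimeter coordinate list of each ring, snapshots its values, rotates that value list by one position clockwise and writes it back; the final min-of-row-sums step is unchanged.
import Mathlib
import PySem

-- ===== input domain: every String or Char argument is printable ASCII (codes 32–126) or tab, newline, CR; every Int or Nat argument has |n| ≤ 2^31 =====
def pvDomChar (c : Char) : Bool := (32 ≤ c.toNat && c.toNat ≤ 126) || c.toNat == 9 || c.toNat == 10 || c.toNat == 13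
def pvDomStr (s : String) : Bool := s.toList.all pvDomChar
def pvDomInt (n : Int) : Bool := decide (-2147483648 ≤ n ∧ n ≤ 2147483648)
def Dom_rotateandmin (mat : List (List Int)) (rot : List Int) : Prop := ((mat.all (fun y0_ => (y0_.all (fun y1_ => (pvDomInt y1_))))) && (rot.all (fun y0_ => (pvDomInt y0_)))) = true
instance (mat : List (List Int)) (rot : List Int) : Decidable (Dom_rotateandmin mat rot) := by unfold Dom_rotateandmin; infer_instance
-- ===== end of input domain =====

-- B rotates each square ring by snapshotting its perimeter coordinates and cyclically shifting the
-- value list, instead of A's four sliced edge lists and interleaved writes; objective: simpler.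
-- Both Pythons mutate `mat` in place identically; the equivalence proved here is about the return value.

-- Python `xs[i] = v` on a list of lists (shared helper of both ports, like the assignment statement itself)
def pySet2 (m : List (List Int)) (i j : Int) (v : Int) : List (List Int) :=
  PySem.List.pySetD m i (PySem.List.pySetD (PySem.List.pyGetD m i []) j v)

-- ===== PORT A =====
def rotateandmin (mat : List (List Int)) (rot : List Int) : Int :=
  let p0 : Int := PySem.List.pyGetD rot 0 0 - PySem.List.pyGetD rot 2 0 - 1
  let p1 : Int := PySem.List.pyGetD rot 1 0 - PySem.List.pyGetD rot 2 0 - 1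
  let p2 : Int := PySem.List.pyGetD rot 0 0 + PySem.List.pyGetD rot 2 0 - 1
  let p3 : Int := PySem.List.pyGetD rot 1 0 + PySem.List.pyGetD rot 2 0 - 1
  let mat := (PySem.List.pyRange 0 (PySem.List.pyGetD rot 2 0) 1).foldl (fun mat k =>
    let r1 := PySem.List.slice (PySem.List.pyGetD mat (p0+k) []) (some (p1+k)) (some (p3+1-k))
    let r1 := PySem.List.slice r1 none (some (-1))
    let r1 := PySem.List.insert r1 0 (PySem.List.pyGetD (PySem.List.pyGetD mat (p0+1+k) []) (p1+k) 0)
    let r2 := PySem.List.slice (PySem.List.pyGetD mat (p2-k) []) (some (p1+k)) (some (p3+1-k))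
    let r2 := PySem.List.slice r2 (some 1) none
    let r2 := r2 ++ [PySem.List.pyGetD (PySem.List.pyGetD mat (p2-k-1) []) (p3-k) 0]
    let c1 := (PySem.List.slice mat (some (p0+k)) (some (p2-k+1))).map (fun x => PySem.List.pyGetD x (p1+k) 0)
    let c2 := (PySem.List.slice mat (some (p0+k)) (some (p2-k+1))).map (fun x => PySem.List.pyGetD x (p3-k) 0)
    let c1 := PySem.List.slice c1 (some 1) none
    let c1 := c1 ++ [PySem.List.pyGetD (PySem.List.pyGetD mat (p2-k) []) (p1+k+1) 0]
    let c2 := PySem.List.slice c2 none (some (-1))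
    let c2 := PySem.List.insert c2 0 (PySem.List.pyGetD (PySem.List.pyGetD mat (p0+k) []) (p3-k-1) 0)
    (PySem.List.pyRange 0 ((PySem.List.pyGetD rot 2 0 - k)*2+1) 1).foldl (fun mat i =>
      let mat := pySet2 mat (p0+k) (p1+i+k) (PySem.List.pyGetD r1 i 0)
      let mat := pySet2 mat (p2-k) (p1+i+k) (PySem.List.pyGetD r2 i 0)
      let mat := pySet2 mat (p0+i+k) (p1+k) (PySem.List.pyGetD c1 i 0)
      pySet2 mat (p0+i+k) (p3-k) (PySem.List.pyGetD c2 i 0)) mat) mat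
  let candidate := mat.foldl (fun acc row => acc ++ [row.sum]) ([] : List Int)
  (PySem.List.min? candidate (fun x => x)).getD 0

-- ===== PORT B =====
def rotateandmin_alt (mat : List (List Int)) (rot : List Int) : Int :=
  let s : Int := PySem.List.pyGetD rot 2 0
  let top0 : Int := PySem.List.pyGetD rot 0 0 - s - 1
  let left0 : Int := PySem.List.pyGetD rot 1 0 - s - 1
  let mat := (PySem.List.pyRange 0 s 1).foldl (fun mat k =>
    let t := top0 + k
    let l := left0 + k
    let b := t + 2*(s-k)
    let r := l + 2*(s-k)
    let coords : List (Int × Int) :=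
      (PySem.List.pyRange l r 1).map (fun j => (t, j)) ++
      (PySem.List.pyRange t b 1).map (fun i => (i, r)) ++
      (PySem.List.pyRange r l (-1)).map (fun j => (b, j)) ++
      (PySem.List.pyRange b t (-1)).map (fun i => (i, l))
    let vals := coords.map (fun c => PySem.List.pyGetD (PySem.List.pyGetD mat c.1 []) c.2 0)
    let vals2 := PySem.List.slice vals (some (-1)) none ++ PySem.List.slice vals none (some (-1))
    (coords.zip vals2).foldl (fun mat cv => pySet2 mat cv.1.1 cv.1.2 cv.2) mat) mat
  (PySem.List.min? (mat.map (fun row => row.sum)) (fun x => x)).getD 0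

-- ===== PRECONDITION & SPEC =====
-- Pre_ restricts to the natural domain of the p17406 rotation: either no rotation step (rot[2] ≤ 0), or a
-- rectangular non-empty matrix whose outermost ring lies fully inside it; outside this A's negative-index
-- wraparound and slice clamping almost always raise IndexError/ValueError and any returned value is accidental.
def Pre_rotateandmin (mat : List (List Int)) (rot : List Int) : Prop :=
  3 ≤ rot.length ∧ mat ≠ [] ∧
  (PySem.List.pyGetD rot 2 0 ≤ 0 ∨
    (0 ≤ PySem.List.pyGetD rot 0 0 - PySem.List.pyGetD rot 2 0 - 1 ∧
     PySem.List.pyGetD rot 0 0 + PySem.List.pyGetD rot 2 0 - 1 < (mat.length : Int) ∧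
     0 ≤ PySem.List.pyGetD rot 1 0 - PySem.List.pyGetD rot 2 0 - 1 ∧
     PySem.List.pyGetD rot 1 0 + PySem.List.pyGetD rot 2 0 - 1 < ((mat.headD []).length : Int) ∧
     ∀ row ∈ mat, row.length = (mat.headD []).length))
instance (mat : List (List Int)) (rot : List Int) : Decidable (Pre_rotateandmin mat rot) := by
  unfold Pre_rotateandmin; infer_instance
def pvWitness_rotateandmin : List (List Int) × List Int := ([[1,2,3],[4,5,6],[7,8,9]], [2,2,1])

def Spec_rotateandmin (mat : List (List Int)) (rot : List Int) (out : Int) : Prop := out = rotateandmin_alt mat rot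
instance (mat : List (List Int)) (rot : List Int) (out : Int) : Decidable (Spec_rotateandmin mat rot out) := by unfold Spec_rotateandmin; infer_instance

-- ===== CLAIM (what is proved, stated in full; the proofs are below) =====
def Claim_equal_rotateandmin : Prop := ∀ (mat : List (List Int)) (rot : List Int), Dom_rotateandmin mat rot → Pre_rotateandmin mat rot → Spec_rotateandmin mat rot (rotateandmin mat rot)


-- ===== LEMMAS AND PROOFS =====

-- matrix shape
def MShape (R C : Nat) (m : List (List Int)) : Prop :=
  m.length = R ∧ ∀ row ∈ m, row.length = C

-- reading one cell, with Python defaults (as both ports read)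
def cell (m : List (List Int)) (i j : Int) : Int :=
  PySem.List.pyGetD (PySem.List.pyGetD m i []) j 0

-- a single write, and a write list applied in order
def wapp (m : List (List Int)) (w : (Int × Int) × Int) : List (List Int) :=
  pySet2 m w.1.1 w.1.2 w.2

def applyW (m : List (List Int)) (ws : List ((Int × Int) × Int)) : List (List Int) :=
  ws.foldl wapp m

def InB (R C : Nat) (w : (Int × Int) × Int) : Prop :=
  0 ≤ w.1.1 ∧ w.1.1 < (R : Int) ∧ 0 ≤ w.1.2 ∧ w.1.2 < (C : Int)

-- last write to a cell in a write list
def lw (ws : List ((Int × Int) × Int)) (c : Int × Int) : Option Int :=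
  ws.foldl (fun acc w => if w.1 = c then some w.2 else acc) none

theorem lw_foldl_acc (ws : List ((Int × Int) × Int)) (c : Int × Int) (acc : Option Int) :
    ws.foldl (fun acc w => if w.1 = c then some w.2 else acc) acc = (lw ws c).or acc := by
  induction ws generalizing acc with
  | nil => simp [lw]
  | cons w ws ih =>
    simp only [lw, List.foldl_cons] at *
    rw [ih, ih (if w.1 = c then some w.2 else none)]
    by_cases h : w.1 = c <;> simp [h, Option.or_assoc]

theorem lw_cons (w : (Int × Int) × Int) (ws : List ((Int × Int) × Int)) (c : Int × Int) :
    lw (w :: ws) c = (lw ws c).or (if w.1 = c then some w.2 else none) := by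
  simp only [lw, List.foldl_cons]
  rw [lw_foldl_acc]; rfl

theorem shape_wapp {R C : Nat} {m : List (List Int)} {w : (Int × Int) × Int}
    (h : MShape R C m) (hw : InB R C w) : MShape R C (wapp m w) := by
  obtain ⟨hlen, hrow⟩ := h
  obtain ⟨h1, h2, h3, h4⟩ := hw
  have hrowmem : PySem.List.pyGetD m w.1.1 [] ∈ m := by
    rw [PySem.List.pyGetD_eq_getElem m [] h1 (by omega)]
    exact List.getElem_mem _
  constructor
  · simp only [wapp, pySet2]
    rw [PySem.List.pySetD_of_nonneg _ _ h1]
    simp [hlen]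
  · intro row hr
    simp only [wapp, pySet2] at hr
    rw [PySem.List.pySetD_of_nonneg _ _ h1] at hr
    rcases List.mem_or_eq_of_mem_set hr with h | h
    · exact hrow _ h
    · subst h
      rw [PySem.List.pySetD_of_nonneg _ _ h3, List.length_set]
      exact hrow _ hrowmem

theorem cell_wapp {R C : Nat} {m : List (List Int)} {w : (Int × Int) × Int}
    (h : MShape R C m) (hw : InB R C w) (x y : Int)
    (hx0 : 0 ≤ x) (hxR : x < (R : Int)) (hy0 : 0 ≤ y) (hyC : y < (C : Int)) :
    cell (wapp m w) x y = if w.1 = (x, y) then w.2 else cell m x y := by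
  obtain ⟨hlen, hrow⟩ := h
  obtain ⟨⟨wi, wj⟩, wv⟩ := w
  obtain ⟨h1, h2, h3, h4⟩ := hw
  simp only at h1 h2 h3 h4
  have hrowmem : PySem.List.pyGetD m wi [] ∈ m := by
    rw [PySem.List.pyGetD_eq_getElem m [] h1 (by omega)]
    exact List.getElem_mem _
  have hC : (PySem.List.pyGetD m wi []).length = C := hrow _ hrowmem
  have ha : wi = ((wi.toNat : Nat) : Int) := by omega
  have hb : wj = ((wj.toNat : Nat) : Int) := by omega
  have hxx : x = ((x.toNat : Nat) : Int) := by omega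
  have hyy : y = ((y.toNat : Nat) : Int) := by omega
  simp only [cell, wapp, pySet2]
  rw [ha] at hC
  rw [ha, hb, hxx, hyy]
  rw [PySem.List.pyGetD_pySetD_natCast m wi.toNat x.toNat _ _ (by omega : wi.toNat < m.length)]
  by_cases hx : x.toNat = wi.toNat
  · rw [if_pos hx]
    rw [PySem.List.pyGetD_pySetD_natCast _ wj.toNat y.toNat _ _ (by omega : wj.toNat < (PySem.List.pyGetD m ((wi.toNat : Nat) : Int) []).length)]
    by_cases hy : y.toNat = wj.toNat
    · rw [if_pos hy, if_pos (by simp only [Prod.ext_iff]; constructor <;> simp <;> omega)]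
    · rw [if_neg hy, if_neg (by simp only [Prod.ext_iff, Prod.fst, Prod.snd]; intro hcc; simp at hcc; omega)]
      rw [← hx]
  · rw [if_neg hx, if_neg (by simp only [Prod.ext_iff, Prod.fst, Prod.snd]; intro hcc; simp at hcc; omega)]

theorem shape_applyW {R C : Nat} {ws : List ((Int × Int) × Int)} {m : List (List Int)}
    (h : MShape R C m) (hws : ∀ w ∈ ws, InB R C w) : MShape R C (applyW m ws) := by
  induction ws generalizing m with
  | nil => exact h
  | cons w ws ih =>
    exact ih (shape_wapp h (hws w (by simp))) (fun w' hw' => hws w' (by simp [hw']))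

theorem cell_applyW {R C : Nat} {ws : List ((Int × Int) × Int)} {m : List (List Int)}
    (h : MShape R C m) (hws : ∀ w ∈ ws, InB R C w) (x y : Int)
    (hx0 : 0 ≤ x) (hxR : x < (R : Int)) (hy0 : 0 ≤ y) (hyC : y < (C : Int)) :
    cell (applyW m ws) x y = (lw ws (x, y)).getD (cell m x y) := by
  induction ws generalizing m with
  | nil => simp [applyW, lw]
  | cons w ws ih =>
    have hstep := cell_wapp h (hws w (by simp)) x y hx0 hxR hy0 hyC
    have := ih (shape_wapp h (hws w (by simp))) (fun w' hw' => hws w' (by simp [hw']))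
    simp only [applyW, List.foldl_cons] at *
    rw [this, lw_cons, hstep]
    cases hlw : lw ws (x, y) <;> by_cases hhit : w.1 = (x, y) <;> simp [hhit, hlw]

theorem lw_eq_f (ws : List ((Int × Int) × Int)) (f : Int × Int → Option Int) (c : Int × Int)
    (h : ∀ w ∈ ws, f w.1 = some w.2) :
    lw ws c = if (∃ w ∈ ws, w.1 = c) then f c else none := by
  induction ws with
  | nil => simp [lw]
  | cons w ws ih =>
    rw [lw_cons, ih (fun w' hw' => h w' (by simp [hw']))]
    have hcons : (∃ w' ∈ w :: ws, w'.1 = c) ↔ (w.1 = c ∨ ∃ w' ∈ ws, w'.1 = c) := by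
      constructor
      · rintro ⟨w', hw', hc⟩
        rcases List.mem_cons.mp hw' with h' | h'
        · exact Or.inl (h' ▸ hc)
        · exact Or.inr ⟨w', h', hc⟩
      · rintro (hc | ⟨w', hw', hc⟩)
        · exact ⟨w, by simp, hc⟩
        · exact ⟨w', List.mem_cons_of_mem _ hw', hc⟩
    have hfc1 : w.1 = c → f c = some w.2 := fun hc => by rw [← hc]; exact h w (by simp)
    have hfc2 : (∃ w' ∈ ws, w'.1 = c) → ∃ v, f c = some v := by
      rintro ⟨w', hw', hc⟩
      exact ⟨w'.2, by rw [← hc]; exact h w' (List.mem_cons_of_mem _ hw')⟩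
    by_cases hhit : w.1 = c <;> by_cases h2 : ∃ w' ∈ ws, w'.1 = c
    · obtain ⟨v, hv⟩ := hfc2 h2
      rw [if_pos h2, if_pos hhit, if_pos (hcons.mpr (Or.inl hhit)), hv]
      simp
    · rw [if_neg h2, if_pos hhit, if_pos (hcons.mpr (Or.inl hhit)), hfc1 hhit]
      simp
    · obtain ⟨v, hv⟩ := hfc2 h2
      rw [if_pos h2, if_neg hhit, if_pos (hcons.mpr (Or.inr h2)), hv]
      simp
    · rw [if_neg h2, if_neg hhit, if_neg (fun hcc => (hcons.mp hcc).elim hhit h2)]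
      simp

theorem cell_eq_getElem {m : List (List Int)} {i j : Nat}
    (hi : i < m.length) (hj : j < m[i].length) :
    cell m (i : Int) (j : Int) = m[i][j] := by
  simp [cell, PySem.List.pyGetD_natCast, List.getD_eq_getElem?_getD,
    List.getElem?_eq_getElem hi, List.getElem?_eq_getElem hj]

theorem mat_ext {R C : Nat} {m1 m2 : List (List Int)}
    (h1 : MShape R C m1) (h2 : MShape R C m2)
    (hc : ∀ x y : Int, 0 ≤ x → x < R → 0 ≤ y → y < C → cell m1 x y = cell m2 x y) :
    m1 = m2 := by
  obtain ⟨hl1, hr1⟩ := h1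
  obtain ⟨hl2, hr2⟩ := h2
  apply List.ext_getElem (by omega)
  intro i hi1 hi2
  have hc1 : m1[i].length = C := hr1 _ (List.getElem_mem _)
  have hc2 : m2[i].length = C := hr2 _ (List.getElem_mem _)
  apply List.ext_getElem (by omega)
  intro j hj1 hj2
  have := hc (i : Int) (j : Int) (by omega) (by omega) (by omega) (by omega)
  rwa [cell_eq_getElem (by omega) hj1, cell_eq_getElem (by omega) hj2] at this


-- Int-indexed list reading helpers (all defaults 0, all indices in range)
theorem pyGetD_int_cons (v : Int) (xs : List Int) (i : Int) (h0 : 0 ≤ i) :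
    PySem.List.pyGetD (v :: xs) i 0 = if i = 0 then v else PySem.List.pyGetD xs (i-1) 0 := by
  by_cases h : i = 0
  · simp [h, PySem.List.pyGetD_zero_cons]
  · lift i to ℕ using h0 with n
    rw [if_neg h]
    obtain ⟨k, rfl⟩ : ∃ k, n = k + 1 := ⟨n - 1, by omega⟩
    rw [show (((k+1 : ℕ) : Int)) - 1 = ((k : ℕ) : Int) by push_cast; ring]
    rw [PySem.List.pyGetD_natCast, PySem.List.pyGetD_natCast]
    simp

theorem pyGetD_int_tail (xs : List Int) (i : Int) (h0 : 0 ≤ i) :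
    PySem.List.pyGetD xs.tail i 0 = PySem.List.pyGetD xs (i+1) 0 := by
  cases xs with
  | nil =>
    lift i to ℕ using h0 with n
    rw [show ((n : ℕ) : Int) + 1 = ((n+1 : ℕ) : Int) by push_cast; ring]
    rw [PySem.List.pyGetD_natCast, PySem.List.pyGetD_natCast]
    simp
  | cons v xs =>
    rw [pyGetD_int_cons v xs (i+1) (by omega)]
    rw [if_neg (by omega)]
    simp

theorem pyGetD_int_dropLast (xs : List Int) (i : Int) (h0 : 0 ≤ i) (hlt : i < (xs.length : Int) - 1) :
    PySem.List.pyGetD xs.dropLast i 0 = PySem.List.pyGetD xs i 0 := by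
  rw [PySem.List.pyGetD_eq_getElem _ _ h0 (by simp [List.length_dropLast]; omega),
      PySem.List.pyGetD_eq_getElem _ _ h0 (by omega)]
  rw [List.getElem_dropLast]

theorem pyGetD_int_append_len (xs : List Int) (v : Int) :
    PySem.List.pyGetD (xs ++ [v]) ((xs.length : Nat) : Int) 0 = v := by
  rw [PySem.List.pyGetD_natCast]
  simp

theorem getD_slice_row (row : List Int) (l n i : Int) (h0 : 0 ≤ l) (hn : 0 ≤ n)
    (hlen : l + n ≤ (row.length : Int)) (hi : 0 ≤ i) (hin : i < n) :
    PySem.List.pyGetD (PySem.List.slice row (some l) (some (l+n))) i 0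
      = PySem.List.pyGetD row (l+i) 0 := by
  rw [PySem.List.slice_of_nonneg row h0 (by omega) (by omega) (by omega)]
  have hlength : (List.take ((l+n).toNat - l.toNat) (List.drop l.toNat row)).length
      = n.toNat := by
    simp [List.length_take, List.length_drop]; omega
  rw [PySem.List.pyGetD_eq_getElem _ _ hi (by rw [hlength]; omega),
      PySem.List.pyGetD_eq_getElem _ _ (by omega) (by omega)]
  rw [List.getElem_take, List.getElem_drop]
  congr 1
  omega

theorem pyGetD_int_append_left (xs : List Int) (v : Int) (i : Int) (h0 : 0 ≤ i)
    (hlt : i < (xs.length : Int)) :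
    PySem.List.pyGetD (xs ++ [v]) i 0 = PySem.List.pyGetD xs i 0 := by
  rw [PySem.List.pyGetD_eq_getElem _ _ h0 (by simp; omega),
      PySem.List.pyGetD_eq_getElem _ _ h0 (by omega)]
  rw [List.getElem_append_left (by omega)]

theorem getElem_slice_row {α : Type} (xs : List α) (a n : Int) (q : Nat) (h0 : 0 ≤ a)
    (hn : 0 ≤ n) (hlen : a + n ≤ (xs.length : Int)) (hq : q < n.toNat)
    (hq' : q < (PySem.List.slice xs (some a) (some (a+n))).length)
    (hq'' : a.toNat + q < xs.length) :
    (PySem.List.slice xs (some a) (some (a+n)))[q] = xs[a.toNat + q] := by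
  rw [List.getElem_of_eq (PySem.List.slice_of_nonneg xs h0 (by omega) (by omega) (by omega)) _]
  rw [List.getElem_take, List.getElem_drop]

theorem length_slice_row' {α : Type} (xs : List α) (a n : Int) (h0 : 0 ≤ a) (hn : 0 ≤ n)
    (hlen : a + n ≤ (xs.length : Int)) :
    ((PySem.List.slice xs (some a) (some (a+n))).length : Int) = n := by
  rw [PySem.List.slice_of_nonneg xs h0 (by omega) (by omega) (by omega)]
  simp [List.length_take, List.length_drop]
  omega

theorem col_get (m : List (List Int)) (t n j i : Int) (h0 : 0 ≤ t) (hn : 0 ≤ n)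
    (hlen : t + n ≤ (m.length : Int)) (hi : 0 ≤ i) (hin : i < n) :
    PySem.List.pyGetD ((PySem.List.slice m (some t) (some (t+n))).map
      (fun x => PySem.List.pyGetD x j 0)) i 0 = cell m (t+i) j := by
  have hlength := length_slice_row' m t n h0 hn hlen
  rw [PySem.List.pyGetD_eq_getElem _ _ hi (by simp; omega)]
  rw [List.getElem_map]
  rw [getElem_slice_row m t n i.toNat h0 hn hlen (by omega) (by omega) (by omega)]
  have : cell m (t+i) j = PySem.List.pyGetD (PySem.List.pyGetD m (t+i) []) j 0 := rfl
  rw [this, PySem.List.pyGetD_eq_getElem m [] (by omega) (by omega)]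
  congr 2
  omega

-- values of A's four edge lists, as reads of the layer-start matrix
theorem r1_get (m : List (List Int)) (t l μ v i : Int) (hμ : 1 ≤ μ) (hl : 0 ≤ l)
    (hrl : l + (2*μ+1) ≤ ((PySem.List.pyGetD m t []).length : Int)) (hi : 0 ≤ i) (hile : i ≤ 2*μ) :
    PySem.List.pyGetD (PySem.List.insert (PySem.List.slice
      (PySem.List.slice (PySem.List.pyGetD m t []) (some l) (some (l + (2*μ+1)))) none (some (-1))) 0 v) i 0
      = if i = 0 then v else cell m t (l+i-1) := by
  rw [PySem.List.slice_to_neg_one, PySem.List.insert_zero, pyGetD_int_cons _ _ i hi]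
  by_cases h : i = 0
  · simp [h]
  · rw [if_neg h, if_neg h]
    have hlen := length_slice_row' (PySem.List.pyGetD m t []) l (2*μ+1) hl (by omega) hrl
    rw [pyGetD_int_dropLast _ _ (by omega) (by omega)]
    rw [getD_slice_row _ _ _ _ hl (by omega) hrl (by omega) (by omega)]
    have : l + (i - 1) = l + i - 1 := by ring
    rw [this]
    rfl

theorem r2_get (m : List (List Int)) (b l μ v i : Int) (hμ : 1 ≤ μ) (hl : 0 ≤ l)
    (hrl : l + (2*μ+1) ≤ ((PySem.List.pyGetD m b []).length : Int)) (hi : 0 ≤ i) (hile : i ≤ 2*μ) :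
    PySem.List.pyGetD ((PySem.List.slice
      (PySem.List.slice (PySem.List.pyGetD m b []) (some l) (some (l + (2*μ+1)))) (some 1) none) ++ [v]) i 0
      = if i = 2*μ then v else cell m b (l+i+1) := by
  rw [PySem.List.slice_from_one]
  have hlen := length_slice_row' (PySem.List.pyGetD m b []) l (2*μ+1) hl (by omega) hrl
  have htl : (((PySem.List.slice (PySem.List.pyGetD m b []) (some l) (some (l + (2*μ+1)))).tail).length : Int) = 2*μ := by
    simp [List.length_tail]; omega
  by_cases h : i = 2*μ
  · rw [if_pos h]
    have : i = ((((PySem.List.slice (PySem.List.pyGetD m b []) (some l) (some (l + (2*μ+1)))).tail).length : Nat) : Int) := by omega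
    rw [this, pyGetD_int_append_len]
  · rw [if_neg h]
    rw [pyGetD_int_append_left _ _ _ hi (by omega)]
    rw [pyGetD_int_tail _ _ hi]
    rw [getD_slice_row _ _ _ _ hl (by omega) hrl (by omega) (by omega)]
    have : l + (i+1) = l + i + 1 := by ring
    rw [this]
    rfl

theorem c1_get (m : List (List Int)) (t l μ v i : Int) (hμ : 1 ≤ μ) (ht : 0 ≤ t)
    (hml : t + (2*μ+1) ≤ (m.length : Int)) (hi : 0 ≤ i) (hile : i ≤ 2*μ) :
    PySem.List.pyGetD ((PySem.List.slice ((PySem.List.slice m (some t) (some (t + (2*μ+1)))).map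
      (fun x => PySem.List.pyGetD x l 0)) (some 1) none) ++ [v]) i 0
      = if i = 2*μ then v else cell m (t+i+1) l := by
  rw [PySem.List.slice_from_one]
  have hlen := length_slice_row' m t (2*μ+1) ht (by omega) hml
  have hmaplen : ((((PySem.List.slice m (some t) (some (t + (2*μ+1)))).map
      (fun x => PySem.List.pyGetD x l 0)).tail).length : Int) = 2*μ := by
    simp [List.length_tail]; omega
  by_cases h : i = 2*μ
  · rw [if_pos h]
    have : i = (((((PySem.List.slice m (some t) (some (t + (2*μ+1)))).map
      (fun x => PySem.List.pyGetD x l 0)).tail).length : Nat) : Int) := by omega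
    rw [this, pyGetD_int_append_len]
  · rw [if_neg h]
    rw [pyGetD_int_append_left _ _ _ hi (by omega)]
    rw [pyGetD_int_tail _ _ hi]
    rw [col_get m t (2*μ+1) l (i+1) ht (by omega) hml (by omega) (by omega)]
    have : t + (i+1) = t + i + 1 := by ring
    rw [this]

theorem c2_get (m : List (List Int)) (t r μ v i : Int) (hμ : 1 ≤ μ) (ht : 0 ≤ t)
    (hml : t + (2*μ+1) ≤ (m.length : Int)) (hi : 0 ≤ i) (hile : i ≤ 2*μ) :
    PySem.List.pyGetD (PySem.List.insert (PySem.List.slice ((PySem.List.slice m (some t) (some (t + (2*μ+1)))).map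
      (fun x => PySem.List.pyGetD x r 0)) none (some (-1))) 0 v) i 0
      = if i = 0 then v else cell m (t+i-1) r := by
  rw [PySem.List.slice_to_neg_one, PySem.List.insert_zero, pyGetD_int_cons _ _ i hi]
  by_cases h : i = 0
  · simp [h]
  · rw [if_neg h, if_neg h]
    have hlen := length_slice_row' m t (2*μ+1) ht (by omega) hml
    rw [pyGetD_int_dropLast _ _ (by omega) (by simp [List.length_map]; omega)]
    rw [col_get m t (2*μ+1) r (i-1) ht (by omega) hml (by omega) (by omega)]
    have : t + (i-1) = t + i - 1 := by ring
    rw [this]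

-- ==== layer-level normal forms ====

def aR1 (m : List (List Int)) (t l μ : Int) : List Int :=
  PySem.List.insert (PySem.List.slice (PySem.List.slice (PySem.List.pyGetD m t [])
    (some l) (some (l + (2*μ+1)))) none (some (-1))) 0
    (PySem.List.pyGetD (PySem.List.pyGetD m (t+1) []) l 0)

def aR2 (m : List (List Int)) (t l μ : Int) : List Int :=
  (PySem.List.slice (PySem.List.slice (PySem.List.pyGetD m (t+2*μ) [])
    (some l) (some (l + (2*μ+1)))) (some 1) none) ++
    [PySem.List.pyGetD (PySem.List.pyGetD m (t+2*μ-1) []) (l+2*μ) 0]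

def aC1 (m : List (List Int)) (t l μ : Int) : List Int :=
  (PySem.List.slice ((PySem.List.slice m (some t) (some (t + (2*μ+1)))).map
    (fun x => PySem.List.pyGetD x l 0)) (some 1) none) ++
    [PySem.List.pyGetD (PySem.List.pyGetD m (t+2*μ) []) (l+1) 0]

def aC2 (m : List (List Int)) (t l μ : Int) : List Int :=
  PySem.List.insert (PySem.List.slice ((PySem.List.slice m (some t) (some (t + (2*μ+1)))).map
    (fun x => PySem.List.pyGetD x (l+2*μ) 0)) none (some (-1))) 0
    (PySem.List.pyGetD (PySem.List.pyGetD m t []) (l+2*μ-1) 0)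

def wAlist (m : List (List Int)) (t l μ : Int) : List ((Int × Int) × Int) :=
  (PySem.List.pyRange 0 (2*μ+1) 1).flatMap (fun i =>
    [((t, l+i), PySem.List.pyGetD (aR1 m t l μ) i 0),
     ((t+2*μ, l+i), PySem.List.pyGetD (aR2 m t l μ) i 0),
     ((t+i, l), PySem.List.pyGetD (aC1 m t l μ) i 0),
     ((t+i, l+2*μ), PySem.List.pyGetD (aC2 m t l μ) i 0)])

def bCoords (t l μ : Int) : List (Int × Int) :=
  (PySem.List.pyRange l (l+2*μ) 1).map (fun j => (t, j)) ++
  (PySem.List.pyRange t (t+2*μ) 1).map (fun i => (i, l+2*μ)) ++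
  (PySem.List.pyRange (l+2*μ) l (-1)).map (fun j => (t+2*μ, j)) ++
  (PySem.List.pyRange (t+2*μ) t (-1)).map (fun i => (i, l))

def bVals2 (m : List (List Int)) (t l μ : Int) : List Int :=
  let vals := (bCoords t l μ).map (fun c => PySem.List.pyGetD (PySem.List.pyGetD m c.1 []) c.2 0)
  PySem.List.slice vals (some (-1)) none ++ PySem.List.slice vals none (some (-1))

def wBlist (m : List (List Int)) (t l μ : Int) : List ((Int × Int) × Int) :=
  (bCoords t l μ).zip (bVals2 m t l μ)

-- the clockwise source map of one ring rotation
def ringSrc (m : List (List Int)) (t l μ : Int) (c : Int × Int) : Option Int :=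
  if c.1 = t ∧ c.2 = l then some (cell m (t+1) l)
  else if c.1 = t ∧ l < c.2 ∧ c.2 ≤ l+2*μ then some (cell m t (c.2 - 1))
  else if c.1 = t+2*μ ∧ l ≤ c.2 ∧ c.2 < l+2*μ then some (cell m (t+2*μ) (c.2 + 1))
  else if c.1 = t+2*μ ∧ c.2 = l+2*μ then some (cell m (t+2*μ-1) (l+2*μ))
  else if c.2 = l ∧ t < c.1 ∧ c.1 < t+2*μ then some (cell m (c.1 + 1) l)
  else if c.2 = l+2*μ ∧ t < c.1 ∧ c.1 < t+2*μ then some (cell m (c.1 - 1) (l+2*μ))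
  else none

def coordFn (t l μ J : Int) : Int × Int :=
  if J < 2*μ then (t, l+J)
  else if J < 4*μ then (t + (J - 2*μ), l + 2*μ)
  else if J < 6*μ then (t + 2*μ, l + 2*μ - (J - 4*μ))
  else (t + 2*μ - (J - 6*μ), l)

theorem foldl_quad (xs : List Int) (q : Int → List ((Int × Int) × Int)) (m : List (List Int)) :
    xs.foldl (fun mat i => applyW mat (q i)) m = applyW m (xs.flatMap q) := by
  induction xs generalizing m with
  | nil => simp [applyW]
  | cons x xs ih =>
    simp only [List.flatMap_cons, List.foldl_cons]
    rw [ih]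
    simp [applyW, List.foldl_append]

theorem bCoords_length (t l μ : Int) (hμ : 1 ≤ μ) : ((bCoords t l μ).length : Int) = 8*μ := by
  simp [bCoords, PySem.List.length_pyRange_one, PySem.List.length_pyRange_neg_one]
  try omega

theorem bCoords_get? (t l μ : Int) (hμ : 1 ≤ μ) (idx : Nat) (hidx : (idx : Int) < 8*μ) :
    (bCoords t l μ)[idx]? = some (coordFn t l μ idx) := by
  have h1 : ((PySem.List.pyRange l (l+2*μ)).map (fun j => ((t : Int), j))).length = (2*μ).toNat := by
    simp [PySem.List.length_pyRange_one]
    try omega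
  have h2 : ((PySem.List.pyRange t (t+2*μ)).map (fun i => (i, l+2*μ))).length = (2*μ).toNat := by
    simp [PySem.List.length_pyRange_one]
    try omega
  have h3 : ((PySem.List.pyRange (l+2*μ) l (-1)).map (fun j => (t+2*μ, j))).length = (2*μ).toNat := by
    simp [PySem.List.length_pyRange_neg_one]
    try omega
  have h4 : ((PySem.List.pyRange (t+2*μ) t (-1)).map (fun i => (i, l))).length = (2*μ).toNat := by
    simp [PySem.List.length_pyRange_neg_one]
    try omega
  unfold bCoords
  rcases Nat.lt_or_ge idx (2*μ).toNat with hc | hc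
  · rw [List.getElem?_append_left (by simp only [List.length_append, h1, h2, h3]; omega)]
    rw [List.getElem?_append_left (by simp only [List.length_append, h1, h2]; omega)]
    rw [List.getElem?_append_left (by simp only [h1]; omega)]
    rw [List.getElem?_map, List.getElem?_eq_getElem (by simp only [PySem.List.length_pyRange_one]; omega)]
    simp only [Option.map_some, PySem.List.getElem_pyRange_one]
    unfold coordFn
    rw [if_pos (by omega)]
  · rcases Nat.lt_or_ge idx (2*(2*μ).toNat) with hc2 | hc2
    · rw [List.getElem?_append_left (by simp only [List.length_append, h1, h2, h3]; omega)]
      rw [List.getElem?_append_left (by simp only [List.length_append, h1, h2]; omega)]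
      rw [List.getElem?_append_right (by simp only [h1]; omega)]
      rw [h1, List.getElem?_map, List.getElem?_eq_getElem (by simp only [PySem.List.length_pyRange_one]; omega)]
      simp only [Option.map_some, PySem.List.getElem_pyRange_one]
      unfold coordFn
      rw [if_neg (by omega), if_pos (by omega)]
      congr 2
      omega
    · rcases Nat.lt_or_ge idx (3*(2*μ).toNat) with hc3 | hc3
      · rw [List.getElem?_append_left (by simp only [List.length_append, h1, h2, h3]; omega)]
        rw [List.getElem?_append_right (by simp only [List.length_append, h1, h2]; omega)]
        simp only [List.length_append, h1, h2]
        rw [PySem.List.pyRange_neg_one, List.map_map, List.getElem?_map,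
            List.getElem?_eq_getElem (by simp only [List.length_range]; omega)]
        simp only [List.getElem_range, Option.map_some, Function.comp]
        unfold coordFn
        rw [if_neg (by omega), if_neg (by omega), if_pos (by omega)]
        congr 3
        omega
      · rw [List.getElem?_append_right (by simp only [List.length_append, h1, h2, h3]; omega)]
        simp only [List.length_append, h1, h2, h3]
        rw [PySem.List.pyRange_neg_one, List.map_map, List.getElem?_map,
            List.getElem?_eq_getElem (by simp only [List.length_range]; omega)]
        simp only [List.getElem_range, Option.map_some, Function.comp]
        unfold coordFn
        rw [if_neg (by omega), if_neg (by omega), if_neg (by omega)]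
        congr 3
        omega

theorem bCoords_len_nat (t l μ : Int) (hμ : 1 ≤ μ) : (bCoords t l μ).length = (8*μ).toNat := by
  have := bCoords_length t l μ hμ
  omega

theorem bCoords_get (t l μ : Int) (hμ : 1 ≤ μ) (idx : Nat) (h : idx < (bCoords t l μ).length) :
    (bCoords t l μ)[idx] = coordFn t l μ idx := by
  have h8 := bCoords_length t l μ hμ
  have := bCoords_get? t l μ hμ idx (by omega)
  rw [List.getElem?_eq_getElem h] at this
  exact Option.some.inj this

theorem bVals2_eq (m : List (List Int)) (t l μ : Int) :
    bVals2 m t l μ =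
      (let vals := (bCoords t l μ).map (fun c => PySem.List.pyGetD (PySem.List.pyGetD m c.1 []) c.2 0)
       vals.drop (vals.length - 1) ++ vals.dropLast) := by
  simp only [bVals2, PySem.List.slice_from_neg_one, PySem.List.slice_to_neg_one]

theorem bVals2_length (m : List (List Int)) (t l μ : Int) (hμ : 1 ≤ μ) :
    (bVals2 m t l μ).length = (bCoords t l μ).length := by
  have hcl := bCoords_len_nat t l μ hμ
  rw [bVals2_eq]
  simp only [List.length_append, List.length_drop, List.length_dropLast, List.length_map]
  omega

theorem bVals2_get? (m : List (List Int)) (t l μ : Int) (hμ : 1 ≤ μ) (idx : Nat)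
    (hidx : (idx : Int) < 8*μ) :
    (bVals2 m t l μ)[idx]? = some (cell m
      (coordFn t l μ (if idx = 0 then 8*μ - 1 else (idx : Int) - 1)).1
      (coordFn t l μ (if idx = 0 then 8*μ - 1 else (idx : Int) - 1)).2) := by
  have hcl := bCoords_len_nat t l μ hμ
  rw [bVals2_eq]
  simp only []
  set vals := (bCoords t l μ).map (fun c => PySem.List.pyGetD (PySem.List.pyGetD m c.1 []) c.2 0) with hv
  have hvlen : vals.length = (8*μ).toNat := by rw [hv, List.length_map, hcl]
  by_cases h0 : idx = 0
  · subst h0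
    rw [List.getElem?_append_left (by simp only [List.length_drop]; omega)]
    rw [List.getElem?_drop]
    rw [hv, List.getElem?_map, bCoords_get? t l μ hμ _ (by simp only [List.length_map, hcl]; omega)]
    simp only [Option.map_some, if_pos rfl]
    rw [show (((vals.length - 1 + 0 : ℕ)) : Int) = 8*μ - 1 by omega]
    rfl
  · rw [List.getElem?_append_right (by simp only [List.length_drop]; omega)]
    have hdl : idx - (vals.drop (vals.length - 1)).length = idx - 1 := by
      simp only [List.length_drop]; omega
    rw [hdl]
    rw [List.getElem?_eq_getElem (by simp only [List.length_dropLast]; omega)]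
    rw [List.getElem_dropLast]
    rw [List.getElem_of_eq hv _, List.getElem_map]
    rw [bCoords_get t l μ hμ _ (by omega)]
    rw [if_neg h0]
    rw [show (((idx - 1 : ℕ)) : Int) = (idx : Int) - 1 by omega]
    rfl

theorem wBlist_get? (m : List (List Int)) (t l μ : Int) (hμ : 1 ≤ μ) (idx : Nat)
    (hidx : (idx : Int) < 8*μ) :
    (wBlist m t l μ)[idx]? = some (coordFn t l μ idx,
      cell m (coordFn t l μ (if idx = 0 then 8*μ - 1 else (idx : Int) - 1)).1
             (coordFn t l μ (if idx = 0 then 8*μ - 1 else (idx : Int) - 1)).2) := by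
  have hcl := bCoords_len_nat t l μ hμ
  have hvl : (bVals2 m t l μ).length = (bCoords t l μ).length := by
    rw [bVals2_eq]
    simp only [List.length_append, List.length_drop, List.length_dropLast, List.length_map]
    omega
  have hc := bCoords_get t l μ hμ idx (by omega)
  have hv2 := bVals2_get? m t l μ hμ idx hidx
  rw [List.getElem?_eq_getElem (by omega : idx < (bVals2 m t l μ).length)] at hv2
  have hv2' := Option.some.inj hv2
  rw [List.getElem?_eq_getElem (by simp only [wBlist, List.length_zip, hvl]; omega)]
  simp only [wBlist, List.getElem_zip]
  rw [hc, hv2']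

theorem cell_congr (m : List (List Int)) {a a' b b' : Int} (ha : a = a') (hb : b = b') :
    cell m a b = cell m a' b' := by rw [ha, hb]

theorem coordFn_seg1 (t l μ J : Int) (h : J < 2*μ) : coordFn t l μ J = (t, l+J) := by
  unfold coordFn; rw [if_pos h]

theorem coordFn_seg2 (t l μ J : Int) (h1 : 2*μ ≤ J) (h2 : J < 4*μ) :
    coordFn t l μ J = (t + (J - 2*μ), l + 2*μ) := by
  unfold coordFn; rw [if_neg (by omega), if_pos h2]

theorem coordFn_seg3 (t l μ J : Int) (hμ : 0 ≤ μ) (h1 : 4*μ ≤ J) (h2 : J < 6*μ) :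
    coordFn t l μ J = (t + 2*μ, l + 2*μ - (J - 4*μ)) := by
  unfold coordFn; rw [if_neg (by omega), if_neg (by omega), if_pos h2]

theorem coordFn_seg4 (t l μ J : Int) (hμ : 0 ≤ μ) (h1 : 6*μ ≤ J) :
    coordFn t l μ J = (t + 2*μ - (J - 6*μ), l) := by
  unfold coordFn; rw [if_neg (by omega), if_neg (by omega), if_neg (by omega)]

-- evaluation lemmas for ringSrc by position class
theorem ringSrc_topleft (m : List (List Int)) (t l μ : Int) (c : Int × Int) (hμ : 1 ≤ μ)
    (h1 : c.1 = t) (h2 : c.2 = l) : ringSrc m t l μ c = some (cell m (t+1) l) := by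
  unfold ringSrc
  split_ifs <;> first | rfl | (exfalso; omega)

theorem ringSrc_top (m : List (List Int)) (t l μ : Int) (c : Int × Int) (hμ : 1 ≤ μ)
    (h1 : c.1 = t) (h2 : l < c.2) (h3 : c.2 ≤ l+2*μ) :
    ringSrc m t l μ c = some (cell m t (c.2 - 1)) := by
  unfold ringSrc
  split_ifs <;> first | rfl | (exfalso; omega)

theorem ringSrc_bottom (m : List (List Int)) (t l μ : Int) (c : Int × Int) (hμ : 1 ≤ μ)
    (h1 : c.1 = t+2*μ) (h2 : l ≤ c.2) (h3 : c.2 < l+2*μ) :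
    ringSrc m t l μ c = some (cell m (t+2*μ) (c.2 + 1)) := by
  unfold ringSrc
  split_ifs <;> first | rfl | (exfalso; omega)

theorem ringSrc_bottomright (m : List (List Int)) (t l μ : Int) (c : Int × Int) (hμ : 1 ≤ μ)
    (h1 : c.1 = t+2*μ) (h2 : c.2 = l+2*μ) :
    ringSrc m t l μ c = some (cell m (t+2*μ-1) (l+2*μ)) := by
  unfold ringSrc
  split_ifs <;> first | rfl | (exfalso; omega)

theorem ringSrc_left (m : List (List Int)) (t l μ : Int) (c : Int × Int) (hμ : 1 ≤ μ)
    (h1 : c.2 = l) (h2 : t < c.1) (h3 : c.1 < t+2*μ) :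
    ringSrc m t l μ c = some (cell m (c.1 + 1) l) := by
  unfold ringSrc
  split_ifs <;> first | rfl | (exfalso; omega)

theorem ringSrc_right (m : List (List Int)) (t l μ : Int) (c : Int × Int) (hμ : 1 ≤ μ)
    (h1 : c.2 = l+2*μ) (h2 : t < c.1) (h3 : c.1 < t+2*μ) :
    ringSrc m t l μ c = some (cell m (c.1 - 1) (l+2*μ)) := by
  unfold ringSrc
  split_ifs <;> first | rfl | (exfalso; omega)

theorem wB_consistent (m : List (List Int)) (t l μ : Int) (hμ : 1 ≤ μ) :
    ∀ w ∈ wBlist m t l μ, ringSrc m t l μ w.1 = some w.2 := by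
  intro w hw
  obtain ⟨idx, hlt, rfl⟩ := List.mem_iff_getElem.mp hw
  have hcl := bCoords_len_nat t l μ hμ
  have hJ : (idx : Int) < 8*μ := by
    have : (wBlist m t l μ).length ≤ (bCoords t l μ).length := by
      simp [wBlist, List.length_zip]
    omega
  have hg := wBlist_get? m t l μ hμ idx hJ
  rw [List.getElem?_eq_getElem hlt] at hg
  rw [Option.some.inj hg]
  simp only []
  by_cases h0 : idx = 0
  · subst h0
    simp only [Nat.cast_zero, if_true, eq_self_iff_true]
    rw [coordFn_seg1 t l μ 0 (by omega), coordFn_seg4 t l μ (8*μ-1) (by omega) (by omega)]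
    rw [ringSrc_topleft m t l μ _ hμ (by omega) (by omega)]
    exact congrArg some (cell_congr m (by omega) (by omega))
  · rw [if_neg h0]
    rcases lt_trichotomy ((idx : Int)) (2*μ) with hs | hs | hs
    · rw [coordFn_seg1 t l μ (idx : Int) (by omega), coordFn_seg1 t l μ ((idx : Int) - 1) (by omega)]
      rw [ringSrc_top m t l μ _ hμ (by omega) (by omega) (by omega)]
      exact congrArg some (cell_congr m (by omega) (by omega))
    · rw [coordFn_seg2 t l μ (idx : Int) (by omega) (by omega), coordFn_seg1 t l μ ((idx : Int) - 1) (by omega)]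
      rw [ringSrc_top m t l μ _ hμ (by omega) (by omega) (by omega)]
      exact congrArg some (cell_congr m (by omega) (by omega))
    · rcases lt_trichotomy ((idx : Int)) (4*μ) with hs2 | hs2 | hs2
      · rw [coordFn_seg2 t l μ (idx : Int) (by omega) (by omega), coordFn_seg2 t l μ ((idx : Int) - 1) (by omega) (by omega)]
        rw [ringSrc_right m t l μ _ hμ (by omega) (by omega) (by omega)]
        exact congrArg some (cell_congr m (by omega) (by omega))
      · rw [coordFn_seg3 t l μ (idx : Int) (by omega) (by omega) (by omega), coordFn_seg2 t l μ ((idx : Int) - 1) (by omega) (by omega)]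
        rw [ringSrc_bottomright m t l μ _ hμ (by omega) (by omega)]
        exact congrArg some (cell_congr m (by omega) (by omega))
      · rcases lt_trichotomy ((idx : Int)) (6*μ) with hs3 | hs3 | hs3
        · rw [coordFn_seg3 t l μ (idx : Int) (by omega) (by omega) (by omega), coordFn_seg3 t l μ ((idx : Int) - 1) (by omega) (by omega) (by omega)]
          rw [ringSrc_bottom m t l μ _ hμ (by omega) (by omega) (by omega)]
          exact congrArg some (cell_congr m (by omega) (by omega))
        · rw [coordFn_seg4 t l μ (idx : Int) (by omega) (by omega), coordFn_seg3 t l μ ((idx : Int) - 1) (by omega) (by omega) (by omega)]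
          rw [ringSrc_bottom m t l μ _ hμ (by omega) (by omega) (by omega)]
          exact congrArg some (cell_congr m (by omega) (by omega))
        · rw [coordFn_seg4 t l μ (idx : Int) (by omega) (by omega), coordFn_seg4 t l μ ((idx : Int) - 1) (by omega) (by omega)]
          rw [ringSrc_left m t l μ _ hμ (by omega) (by omega) (by omega)]
          exact congrArg some (cell_congr m (by omega) (by omega))

theorem wA_consistent (m : List (List Int)) (t l μ : Int) (hμ : 1 ≤ μ) (ht : 0 ≤ t) (hl : 0 ≤ l)
    (hrt : l + (2*μ+1) ≤ ((PySem.List.pyGetD m t []).length : Int))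
    (hrb : l + (2*μ+1) ≤ ((PySem.List.pyGetD m (t+2*μ) []).length : Int))
    (hmlen : t + (2*μ+1) ≤ (m.length : Int)) :
    ∀ w ∈ wAlist m t l μ, ringSrc m t l μ w.1 = some w.2 := by
  intro w hw
  unfold wAlist at hw
  rw [List.mem_flatMap] at hw
  obtain ⟨i, hi, hw4⟩ := hw
  rw [PySem.List.mem_pyRange_one] at hi
  simp only [List.mem_cons, List.mem_singleton] at hw4
  rcases hw4 with h | h | h | h | h
  · subst h
    simp only []
    unfold aR1
    rw [r1_get m t l μ _ i hμ hl hrt hi.1 (by omega)]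
    by_cases hz : i = 0
    · rw [if_pos hz, ringSrc_topleft m t l μ _ hμ (by omega) (by omega)]
      all_goals rfl
    · rw [if_neg hz, ringSrc_top m t l μ _ hμ (by omega) (by omega) (by omega)]
      all_goals first | rfl | exact congrArg some (cell_congr m (by omega) (by omega))
  · subst h
    simp only []
    unfold aR2
    rw [r2_get m (t+2*μ) l μ _ i hμ hl hrb hi.1 (by omega)]
    by_cases hz : i = 2*μ
    · rw [if_pos hz, ringSrc_bottomright m t l μ _ hμ (by omega) (by omega)]
      all_goals rfl
    · rw [if_neg hz, ringSrc_bottom m t l μ _ hμ (by omega) (by omega) (by omega)]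
      all_goals first | rfl | exact congrArg some (cell_congr m (by omega) (by omega))
  · subst h
    simp only []
    unfold aC1
    rw [c1_get m t l μ _ i hμ ht hmlen hi.1 (by omega)]
    by_cases hz : i = 2*μ
    · rw [if_pos hz, ringSrc_bottom m t l μ _ hμ (by omega) (by omega) (by omega)]
      all_goals first | rfl | exact congrArg some (cell_congr m (by omega) (by omega))
    · by_cases hz0 : i = 0
      · rw [if_neg hz, ringSrc_topleft m t l μ _ hμ (by omega) (by omega)]
        all_goals first | rfl | exact congrArg some (cell_congr m (by omega) (by omega))
      · rw [if_neg hz, ringSrc_left m t l μ _ hμ (by omega) (by omega) (by omega)]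
        all_goals first | rfl | exact congrArg some (cell_congr m (by omega) (by omega))
  · subst h
    simp only []
    unfold aC2
    rw [c2_get m t (l+2*μ) μ _ i hμ ht hmlen hi.1 (by omega)]
    by_cases hz : i = 0
    · rw [if_pos hz, ringSrc_top m t l μ _ hμ (by omega) (by omega) (by omega)]
      all_goals first | rfl | exact congrArg some (cell_congr m (by omega) (by omega))
    · by_cases hz2 : i = 2*μ
      · rw [if_neg hz, ringSrc_bottomright m t l μ _ hμ (by omega) (by omega)]
        all_goals first | rfl | exact congrArg some (cell_congr m (by omega) (by omega))
      · rw [if_neg hz, ringSrc_right m t l μ _ hμ (by omega) (by omega) (by omega)]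
        all_goals first | rfl | exact congrArg some (cell_congr m (by omega) (by omega))
  · exact absurd h (by simp)

theorem wA_inb {R C : Nat} (m : List (List Int)) (t l μ : Int) (hμ : 1 ≤ μ) (ht : 0 ≤ t)
    (hb : t + 2*μ < (R : Int)) (hl : 0 ≤ l) (hr : l + 2*μ < (C : Int)) :
    ∀ w ∈ wAlist m t l μ, InB R C w := by
  intro w hw
  unfold wAlist at hw
  rw [List.mem_flatMap] at hw
  obtain ⟨i, hi, hw4⟩ := hw
  rw [PySem.List.mem_pyRange_one] at hi
  simp only [List.mem_cons, List.mem_singleton] at hw4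
  rcases hw4 with h | h | h | h | h <;> first
    | (subst h; refine ⟨?_, ?_, ?_, ?_⟩ <;> (try simp only []) <;> omega)
    | exact absurd h (by simp)

theorem wB_inb {R C : Nat} (m : List (List Int)) (t l μ : Int) (hμ : 1 ≤ μ) (ht : 0 ≤ t)
    (hb : t + 2*μ < (R : Int)) (hl : 0 ≤ l) (hr : l + 2*μ < (C : Int)) :
    ∀ w ∈ wBlist m t l μ, InB R C w := by
  intro w hw
  have hc : w.1 ∈ bCoords t l μ := by
    obtain ⟨a, b⟩ := w
    exact (List.of_mem_zip hw).1
  unfold bCoords at hc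
  simp only [List.mem_append, List.mem_map] at hc
  rcases hc with ((⟨j, hj, he⟩ | ⟨j, hj, he⟩) | ⟨j, hj, he⟩) | ⟨j, hj, he⟩ <;>
    [rw [PySem.List.mem_pyRange_one] at hj; rw [PySem.List.mem_pyRange_one] at hj;
     rw [PySem.List.mem_pyRange_neg_one] at hj; rw [PySem.List.mem_pyRange_neg_one] at hj] <;>
    (refine ⟨?_, ?_, ?_, ?_⟩ <;> rw [← he] <;> (try simp only []) <;> omega)

theorem hit_wA (m : List (List Int)) (t l μ : Int) (hμ : 1 ≤ μ) (c : Int × Int)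
    (hne : ringSrc m t l μ c ≠ none) : ∃ w ∈ wAlist m t l μ, w.1 = c := by
  obtain ⟨cx, cy⟩ := c
  unfold ringSrc at hne
  split_ifs at hne with h1 h2 h3 h4 h5 h6
  · refine ⟨((t, l+0), PySem.List.pyGetD (aR1 m t l μ) 0 0), ?_, ?_⟩
    · exact List.mem_flatMap.mpr ⟨0, by rw [PySem.List.mem_pyRange_one]; omega, by simp⟩
    · try simp only [] at h1 ⊢
      rw [Prod.ext_iff]
      constructor <;> (try simp only []) <;> omega
  · refine ⟨((t, l+(cy-l)), PySem.List.pyGetD (aR1 m t l μ) (cy-l) 0), ?_, ?_⟩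
    · exact List.mem_flatMap.mpr ⟨cy-l, by rw [PySem.List.mem_pyRange_one]; simp only [] at h2; omega, by simp⟩
    · try simp only [] at h2 ⊢
      rw [Prod.ext_iff]
      constructor <;> (try simp only []) <;> omega
  · refine ⟨((t+2*μ, l+(cy-l)), PySem.List.pyGetD (aR2 m t l μ) (cy-l) 0), ?_, ?_⟩
    · exact List.mem_flatMap.mpr ⟨cy-l, by rw [PySem.List.mem_pyRange_one]; simp only [] at h3; omega, by simp⟩
    · try simp only [] at h3 ⊢
      rw [Prod.ext_iff]
      constructor <;> (try simp only []) <;> omega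
  · refine ⟨((t+2*μ, l+2*μ), PySem.List.pyGetD (aR2 m t l μ) (2*μ) 0), ?_, ?_⟩
    · exact List.mem_flatMap.mpr ⟨2*μ, by rw [PySem.List.mem_pyRange_one]; omega, by simp⟩
    · try simp only [] at h4 ⊢
      rw [Prod.ext_iff]
      constructor <;> (try simp only []) <;> omega
  · refine ⟨((t+(cx-t), l), PySem.List.pyGetD (aC1 m t l μ) (cx-t) 0), ?_, ?_⟩
    · exact List.mem_flatMap.mpr ⟨cx-t, by rw [PySem.List.mem_pyRange_one]; simp only [] at h5; omega, by simp⟩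
    · try simp only [] at h5 ⊢
      rw [Prod.ext_iff]
      constructor <;> (try simp only []) <;> omega
  · refine ⟨((t+(cx-t), l+2*μ), PySem.List.pyGetD (aC2 m t l μ) (cx-t) 0), ?_, ?_⟩
    · exact List.mem_flatMap.mpr ⟨cx-t, by rw [PySem.List.mem_pyRange_one]; simp only [] at h6; omega, by simp⟩
    · try simp only [] at h6 ⊢
      rw [Prod.ext_iff]
      constructor <;> (try simp only []) <;> omega
  · exact absurd rfl hne

theorem wB_hit_of_idx (m : List (List Int)) (t l μ : Int) (hμ : 1 ≤ μ) (c : Int × Int)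
    (idx : Nat) (hidx : (idx : Int) < 8*μ) (hc : coordFn t l μ idx = c) :
    ∃ w ∈ wBlist m t l μ, w.1 = c := by
  have hcl := bCoords_len_nat t l μ hμ
  have hvl := bVals2_length m t l μ hμ
  have hlen : idx < (wBlist m t l μ).length := by
    simp only [wBlist, List.length_zip, hvl]
    omega
  refine ⟨(wBlist m t l μ)[idx], List.getElem_mem _, ?_⟩
  have hg := wBlist_get? m t l μ hμ idx hidx
  rw [List.getElem?_eq_getElem hlen] at hg
  rw [Option.some.inj hg]
  simp only []
  exact hc

theorem hit_wB (m : List (List Int)) (t l μ : Int) (hμ : 1 ≤ μ) (c : Int × Int)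
    (hne : ringSrc m t l μ c ≠ none) : ∃ w ∈ wBlist m t l μ, w.1 = c := by
  obtain ⟨cx, cy⟩ := c
  unfold ringSrc at hne
  split_ifs at hne with h1 h2 h3 h4 h5 h6
  · simp only [] at h1
    exact wB_hit_of_idx m t l μ hμ _ 0 (by omega) (by
      rw [Nat.cast_zero, coordFn_seg1 t l μ 0 (by omega)]
      rw [Prod.ext_iff]
      constructor <;> (try simp only []) <;> omega)
  · simp only [] at h2
    exact wB_hit_of_idx m t l μ hμ _ (cy - l).toNat (by omega) (by
      rw [show (((cy - l).toNat : Nat) : Int) = cy - l by omega]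
      unfold coordFn
      split_ifs <;> first | (rw [Prod.ext_iff]; constructor <;> (try simp only []) <;> omega) | (exfalso; omega))
  · simp only [] at h3
    exact wB_hit_of_idx m t l μ hμ _ (4*μ + (l + 2*μ - cy)).toNat (by omega) (by
      rw [show (((4*μ + (l + 2*μ - cy)).toNat : Nat) : Int) = 4*μ + (l + 2*μ - cy) by omega]
      unfold coordFn
      split_ifs <;> first | (rw [Prod.ext_iff]; constructor <;> (try simp only []) <;> omega) | (exfalso; omega))
  · simp only [] at h4
    exact wB_hit_of_idx m t l μ hμ _ (4*μ).toNat (by omega) (by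
      rw [show (((4*μ).toNat : Nat) : Int) = 4*μ by omega]
      unfold coordFn
      split_ifs <;> first | (rw [Prod.ext_iff]; constructor <;> (try simp only []) <;> omega) | (exfalso; omega))
  · simp only [] at h5
    exact wB_hit_of_idx m t l μ hμ _ (6*μ + (t + 2*μ - cx)).toNat (by omega) (by
      rw [show (((6*μ + (t + 2*μ - cx)).toNat : Nat) : Int) = 6*μ + (t + 2*μ - cx) by omega]
      unfold coordFn
      split_ifs <;> first | (rw [Prod.ext_iff]; constructor <;> (try simp only []) <;> omega) | (exfalso; omega))
  · simp only [] at h6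
    exact wB_hit_of_idx m t l μ hμ _ (2*μ + (cx - t)).toNat (by omega) (by
      rw [show (((2*μ + (cx - t)).toNat : Nat) : Int) = 2*μ + (cx - t) by omega]
      unfold coordFn
      split_ifs <;> first | (rw [Prod.ext_iff]; constructor <;> (try simp only []) <;> omega) | (exfalso; omega))
  · exact absurd rfl hne

theorem step_eq {R C : Nat} (m : List (List Int)) (hS : MShape R C m) (t l μ : Int)
    (hμ : 1 ≤ μ) (ht : 0 ≤ t) (hb : t + 2*μ < (R:Int)) (hl : 0 ≤ l) (hr : l + 2*μ < (C:Int)) :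
    applyW m (wAlist m t l μ) = applyW m (wBlist m t l μ) := by
  obtain ⟨hlen, hrow⟩ := hS
  have hS' : MShape R C m := ⟨hlen, hrow⟩
  have hrowt : (PySem.List.pyGetD m t []).length = C := by
    rw [PySem.List.pyGetD_eq_getElem m [] ht (by omega)]
    exact hrow _ (List.getElem_mem _)
  have hrowb : (PySem.List.pyGetD m (t+2*μ) []).length = C := by
    rw [PySem.List.pyGetD_eq_getElem m [] (by omega) (by omega)]
    exact hrow _ (List.getElem_mem _)
  have hAin := wA_inb (R := R) (C := C) m t l μ hμ ht hb hl hr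
  have hBin := wB_inb (R := R) (C := C) m t l μ hμ ht hb hl hr
  have hAc := wA_consistent m t l μ hμ ht hl (by omega) (by omega) (by omega)
  have hBc := wB_consistent m t l μ hμ
  apply mat_ext (shape_applyW hS' hAin) (shape_applyW hS' hBin)
  intro x y hx0 hxR hy0 hyC
  rw [cell_applyW hS' hAin x y hx0 hxR hy0 hyC, cell_applyW hS' hBin x y hx0 hxR hy0 hyC]
  rw [lw_eq_f _ (ringSrc m t l μ) _ hAc, lw_eq_f _ (ringSrc m t l μ) _ hBc]
  by_cases hrsn : ringSrc m t l μ (x, y) = none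
  · split_ifs <;> simp [hrsn]
  · rw [if_pos (hit_wA m t l μ hμ (x,y) hrsn), if_pos (hit_wB m t l μ hμ (x,y) hrsn)]

theorem foldl_ext {α β : Type} (f g : β → α → β) (h : ∀ b a, f b a = g b a) :
    ∀ (l : List α) (init : β), l.foldl f init = l.foldl g init := by
  intro l
  induction l with
  | nil => intro init; rfl
  | cons x xs ih => intro init; simp only [List.foldl_cons, h]; exact ih _

theorem fold_eq {R C : Nat} (ks : List Int) (p0 p1 s : Int)
    (hcond : ∀ k ∈ ks, 1 ≤ s - k ∧ 0 ≤ p0 + k ∧ (p0 + k) + 2*(s-k) < (R:Int) ∧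
      0 ≤ p1 + k ∧ (p1 + k) + 2*(s-k) < (C:Int)) :
    ∀ m, MShape R C m →
      ks.foldl (fun mat k => applyW mat (wAlist mat (p0+k) (p1+k) (s-k))) m
        = ks.foldl (fun mat k => applyW mat (wBlist mat (p0+k) (p1+k) (s-k))) m := by
  induction ks with
  | nil => intro m _; rfl
  | cons k ks ih =>
    intro m hS
    obtain ⟨hc1, hc2, hc3, hc4, hc5⟩ := hcond k (by simp)
    have hstep := step_eq (R := R) (C := C) m hS (p0+k) (p1+k) (s-k) hc1 hc2 hc3 hc4 hc5
    simp only [List.foldl_cons]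
    rw [hstep]
    exact ih (fun k' hk' => hcond k' (by simp [hk'])) _
      (shape_applyW hS (wB_inb (R := R) (C := C) m (p0+k) (p1+k) (s-k) hc1 hc2 hc3 hc4 hc5))
-- ===== VERDICT (by name: the statement is the Claim_ definition above) =====
theorem rotateandmin_spec : Claim_equal_rotateandmin := by
  intro mat rot _hdom hpre
  obtain ⟨hrl, hmne, hcase⟩ := hpre
  unfold Spec_rotateandmin rotateandmin rotateandmin_alt
  simp only []
  rw [PySem.List.foldl_append_singleton_eq_map]
  rw [List.nil_append]
  congr 1
  congr 1
  congr 1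
  by_cases hs : PySem.List.pyGetD rot 2 0 ≤ 0
  · rw [PySem.List.pyRange_one_eq_nil hs]
    simp only [List.foldl_nil]
  · rcases hcase with h | ⟨hp0, hp2, hp1, hp3, hrect⟩
    · omega
    · have hshape : MShape mat.length (mat.headD []).length mat := ⟨rfl, hrect⟩
      calc (PySem.List.pyRange 0 (PySem.List.pyGetD rot 2 0) 1).foldl _ mat
          = (PySem.List.pyRange 0 (PySem.List.pyGetD rot 2 0) 1).foldl
              (fun m2 k => applyW m2 (wAlist m2
                ((PySem.List.pyGetD rot 0 0 - PySem.List.pyGetD rot 2 0 - 1) + k)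
                ((PySem.List.pyGetD rot 1 0 - PySem.List.pyGetD rot 2 0 - 1) + k)
                (PySem.List.pyGetD rot 2 0 - k))) mat := by
            apply foldl_ext
            intro m2 k
            simp only [
              show (PySem.List.pyGetD rot 2 0 - k)*2+1 = 2*(PySem.List.pyGetD rot 2 0 - k)+1 from by ring,
              show ∀ i : Int, PySem.List.pyGetD rot 1 0 - PySem.List.pyGetD rot 2 0 - 1 + i + k = (PySem.List.pyGetD rot 1 0 - PySem.List.pyGetD rot 2 0 - 1 + k) + i from fun i => by ring,
              show ∀ i : Int, PySem.List.pyGetD rot 0 0 - PySem.List.pyGetD rot 2 0 - 1 + i + k = (PySem.List.pyGetD rot 0 0 - PySem.List.pyGetD rot 2 0 - 1 + k) + i from fun i => by ring,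
              show PySem.List.pyGetD rot 0 0 + PySem.List.pyGetD rot 2 0 - 1 - k = (PySem.List.pyGetD rot 0 0 - PySem.List.pyGetD rot 2 0 - 1 + k) + 2*(PySem.List.pyGetD rot 2 0 - k) from by ring,
              show PySem.List.pyGetD rot 1 0 + PySem.List.pyGetD rot 2 0 - 1 + 1 - k = (PySem.List.pyGetD rot 1 0 - PySem.List.pyGetD rot 2 0 - 1 + k) + (2*(PySem.List.pyGetD rot 2 0 - k)+1) from by ring,
              show PySem.List.pyGetD rot 1 0 + PySem.List.pyGetD rot 2 0 - 1 - k = (PySem.List.pyGetD rot 1 0 - PySem.List.pyGetD rot 2 0 - 1 + k) + 2*(PySem.List.pyGetD rot 2 0 - k) from by ring,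
              show (PySem.List.pyGetD rot 0 0 - PySem.List.pyGetD rot 2 0 - 1 + k) + 2*(PySem.List.pyGetD rot 2 0 - k) + 1 = (PySem.List.pyGetD rot 0 0 - PySem.List.pyGetD rot 2 0 - 1 + k) + (2*(PySem.List.pyGetD rot 2 0 - k)+1) from by ring]
            exact foldl_quad _ (fun i =>
              [(((PySem.List.pyGetD rot 0 0 - PySem.List.pyGetD rot 2 0 - 1 + k), (PySem.List.pyGetD rot 1 0 - PySem.List.pyGetD rot 2 0 - 1 + k) + i), PySem.List.pyGetD (aR1 m2 (PySem.List.pyGetD rot 0 0 - PySem.List.pyGetD rot 2 0 - 1 + k) (PySem.List.pyGetD rot 1 0 - PySem.List.pyGetD rot 2 0 - 1 + k) (PySem.List.pyGetD rot 2 0 - k)) i 0),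
               (((PySem.List.pyGetD rot 0 0 - PySem.List.pyGetD rot 2 0 - 1 + k) + 2*(PySem.List.pyGetD rot 2 0 - k), (PySem.List.pyGetD rot 1 0 - PySem.List.pyGetD rot 2 0 - 1 + k) + i), PySem.List.pyGetD (aR2 m2 (PySem.List.pyGetD rot 0 0 - PySem.List.pyGetD rot 2 0 - 1 + k) (PySem.List.pyGetD rot 1 0 - PySem.List.pyGetD rot 2 0 - 1 + k) (PySem.List.pyGetD rot 2 0 - k)) i 0),
               (((PySem.List.pyGetD rot 0 0 - PySem.List.pyGetD rot 2 0 - 1 + k) + i, (PySem.List.pyGetD rot 1 0 - PySem.List.pyGetD rot 2 0 - 1 + k)), PySem.List.pyGetD (aC1 m2 (PySem.List.pyGetD rot 0 0 - PySem.List.pyGetD rot 2 0 - 1 + k) (PySem.List.pyGetD rot 1 0 - PySem.List.pyGetD rot 2 0 - 1 + k) (PySem.List.pyGetD rot 2 0 - k)) i 0),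
               (((PySem.List.pyGetD rot 0 0 - PySem.List.pyGetD rot 2 0 - 1 + k) + i, (PySem.List.pyGetD rot 1 0 - PySem.List.pyGetD rot 2 0 - 1 + k) + 2*(PySem.List.pyGetD rot 2 0 - k)), PySem.List.pyGetD (aC2 m2 (PySem.List.pyGetD rot 0 0 - PySem.List.pyGetD rot 2 0 - 1 + k) (PySem.List.pyGetD rot 1 0 - PySem.List.pyGetD rot 2 0 - 1 + k) (PySem.List.pyGetD rot 2 0 - k)) i 0)]) m2
        _ = (PySem.List.pyRange 0 (PySem.List.pyGetD rot 2 0) 1).foldl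
              (fun m2 k => applyW m2 (wBlist m2
                ((PySem.List.pyGetD rot 0 0 - PySem.List.pyGetD rot 2 0 - 1) + k)
                ((PySem.List.pyGetD rot 1 0 - PySem.List.pyGetD rot 2 0 - 1) + k)
                (PySem.List.pyGetD rot 2 0 - k))) mat := by
            apply fold_eq (R := mat.length) (C := (mat.headD []).length)
            · intro k hk
              rw [PySem.List.mem_pyRange_one] at hk
              refine ⟨by omega, by omega, by omega, by omega, by omega⟩
            · exact hshape
        _ = _ := by
            apply foldl_ext
            intro m2 k
            rfl
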